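-- pv_equiv track=rewrite | github.com/kjljixx/codespaces-blank | getWords.py | generateConlangIpaWords
-- ===== SOURCE A (Python) =====
-- def generateConlangIpaWords(numSyllables: int):
--     consonants = ["l", "n", "s", "t", "k", "v", "b"] #l, n, s, t
--     vowels = ["ɑ", "ɛ", "oʊ", "ʌ"] #ah, eh, oh, uh
--     syllables = []
--     for consonant in consonants:
--         for vowel in vowels:
--             syllables.append([consonant, vowel])
--
--     words = []
--     newWords = []
--     for i in range(len(syllables)):
--         words.append(syllables[i])
--     for i in range(numSyllables-1):
--         for word in words:
--             for syllable in syllables: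
--                 newWords.append(word+syllable)
--         words = newWords
--         newWords = []
--     return words
-- ===== SOURCE B (Python) =====
-- def generateConlangIpaWords(numSyllables: int):
--     consonants = ["l", "n", "s", "t", "k", "v", "b"]
--     vowels = ["ɑ", "ɛ", "oʊ", "ʌ"]
--     syllables = [[c, v] for c in consonants for v in vowels]
--
--     def build(k: int) -> list:
--         if k <= 1:
--             return syllables
--         suffixes = build(k - 1)
--         return [syl + rest for syl in syllables for rest in suffixes]
--
--     return build(numSyllables)
-- ===== Notes on version B (the rewrite author's own statement) =====
-- stated objective: simpler
-- what changed: Replaces A's five imperative loops with mutable words/newWords accumulators (extending words on the right each pass) by a recursive back-to-front construction: build(k) prepends each syllable to the recursively built length-(k-1) suffixes via comprehensions.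
import Mathlib
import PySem

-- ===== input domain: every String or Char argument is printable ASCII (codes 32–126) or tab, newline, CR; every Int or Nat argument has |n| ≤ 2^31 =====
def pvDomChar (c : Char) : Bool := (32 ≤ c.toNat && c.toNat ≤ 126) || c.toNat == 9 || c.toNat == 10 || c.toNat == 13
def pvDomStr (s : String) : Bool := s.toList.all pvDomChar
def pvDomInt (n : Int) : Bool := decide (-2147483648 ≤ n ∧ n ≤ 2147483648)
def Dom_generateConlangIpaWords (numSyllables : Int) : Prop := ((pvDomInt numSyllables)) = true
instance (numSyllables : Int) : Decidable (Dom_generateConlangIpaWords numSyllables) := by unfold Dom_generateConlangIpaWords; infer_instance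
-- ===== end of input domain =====

-- B replaces A's iterative append-on-the-right word growth (mutable words/newWords
-- accumulators) by a recursive back-to-front construction prepending the first syllable.
-- ===== PORT A =====
def pvA_consonants : List String := ["l", "n", "s", "t", "k", "v", "b"]
def pvA_vowels : List String := ["ɑ", "ɛ", "oʊ", "ʌ"]
-- the two syllable-building loops: syllables.append([consonant, vowel])
def pvA_syllables : List (List String) :=
  pvA_consonants.foldl (fun syllables consonant =>
    pvA_vowels.foldl (fun syllables vowel => syllables ++ [[consonant, vowel]]) syllables) []
-- for i in range(len(syllables)): words.append(syllables[i])
def pvA_initWords : List (List String) :=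
  (PySem.List.pyRange 0 (pvA_syllables.length : Int) 1).foldl
    (fun words i => words ++ [PySem.List.pyGetD pvA_syllables i []]) []
def generateConlangIpaWords (numSyllables : Int) : List (List String) :=
  (PySem.List.pyRange 0 (numSyllables - 1) 1).foldl
    (fun words _ =>
      -- newWords starts [], collects word+syllable, then words = newWords; newWords = []
      -- (list.append ported as cons + one final reverse: the same list, built linearly)
      (words.foldl (fun newWords word =>
        pvA_syllables.foldl (fun newWords syllable => (word ++ syllable) :: newWords) newWords) []).reverse)
    pvA_initWords

-- ===== PORT B =====
-- the comprehension [[c, v] for c in consonants for v in vowels]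
def pvSyllables : List (List String) :=
  (["l", "n", "s", "t", "k", "v", "b"] : List String).flatMap
    (fun c => (["ɑ", "ɛ", "oʊ", "ʌ"] : List String).map (fun v => [c, v]))

-- build(k): k ≤ 1 returns the syllables, else prepend each syllable to each suffix.
-- Python's Int argument with the 'k <= 1' base case maps to recursion on k.toNat
-- (every Int k ≤ 1 has k.toNat ≤ 1, landing in the same base case).
def pvBuild : Nat → List (List String)
  | 0 => pvSyllables
  | 1 => pvSyllables
  | (k + 2) =>
    let suffixes := pvBuild (k + 1)
    pvSyllables.flatMap (fun syl => suffixes.map (fun rest => syl ++ rest))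

def generateConlangIpaWords_alt (numSyllables : Int) : List (List String) :=
  pvBuild numSyllables.toNat

-- ===== PRECONDITION & SPEC =====
def Spec_generateConlangIpaWords (numSyllables : Int) (out : List (List String)) : Prop := out = generateConlangIpaWords_alt numSyllables
instance (numSyllables : Int) (out : List (List String)) : Decidable (Spec_generateConlangIpaWords numSyllables out) := by unfold Spec_generateConlangIpaWords; infer_instance

-- ===== CLAIM (what is proved, stated in full; the proofs are below) =====
def Claim_equal_generateConlangIpaWords : Prop := ∀ (numSyllables : Int), Dom_generateConlangIpaWords numSyllables → Spec_generateConlangIpaWords numSyllables (generateConlangIpaWords numSyllables)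

-- ===== LEMMAS AND PROOFS =====
-- one A-pass: extend every word on the right by every syllable
def pvStepA (ws : List (List String)) : List (List String) :=
  ws.flatMap (fun w => pvSyllables.map (fun s => w ++ s))

-- one B-layer: prepend every syllable on the left of every suffix
def pvStepB (ws : List (List String)) : List (List String) :=
  pvSyllables.flatMap (fun s => ws.map (fun r => s ++ r))

theorem pvA_syll_eq : pvA_syllables = pvSyllables := by rfl

theorem pvA_init_eq : pvA_initWords = pvSyllables := by
  unfold pvA_initWords
  rw [PySem.List.foldl_pyRange_zero_pyGetD' pvA_syllables [] (fun acc x => acc ++ [x]) [],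
    PySem.List.foldl_append_singleton_eq_self, List.nil_append, pvA_syll_eq]

theorem pvFoldl_cons_rev {α β : Type} (f : α → β) (l : List α) (acc : List β) :
    l.foldl (fun a x => f x :: a) acc = (l.map f).reverse ++ acc := by
  induction l generalizing acc with
  | nil => rfl
  | cons x xs ih => simp [ih]

theorem pvFoldl_revblocks {α β : Type} (g : α → List β) (l : List α) (acc : List β) :
    l.foldl (fun a x => (g x).reverse ++ a) acc = (l.flatMap g).reverse ++ acc := by
  induction l generalizing acc with
  | nil => rfl
  | cons x xs ih => simp [ih]

theorem pvA_body_eq (ws : List (List String)) :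
    (ws.foldl (fun newWords word =>
      pvA_syllables.foldl (fun newWords syllable => (word ++ syllable) :: newWords) newWords) []).reverse
    = pvStepA ws := by
  have hin : ∀ (nw : List (List String)) (w : List String),
      pvA_syllables.foldl (fun nw s => (w ++ s) :: nw) nw
        = (pvA_syllables.map (fun s => w ++ s)).reverse ++ nw := by
    intro nw w
    exact pvFoldl_cons_rev (fun s => w ++ s) pvA_syllables nw
  simp only [hin]
  rw [pvFoldl_revblocks, List.append_nil, List.reverse_reverse, pvA_syll_eq]
  simp only [pvStepA]

theorem pvFoldl_const {α β : Type} (f : β → β) (l : List α) (init : β) :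
    l.foldl (fun b _ => f b) init = f^[l.length] init := by
  induction l generalizing init with
  | nil => rfl
  | cons x xs ih => simp [List.foldl_cons, ih, Function.iterate_succ_apply]

theorem pvA_eq (n : Int) :
    generateConlangIpaWords n = pvStepA^[(n - 1).toNat] pvSyllables := by
  unfold generateConlangIpaWords
  rw [pvA_init_eq]
  have hfun : (fun (words : List (List String)) (_ : Int) =>
      (words.foldl (fun newWords word =>
        pvA_syllables.foldl (fun newWords syllable => (word ++ syllable) :: newWords) newWords) []).reverse)
      = fun ws _ => pvStepA ws := by
    funext ws i
    exact pvA_body_eq ws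
  rw [hfun, pvFoldl_const, PySem.List.length_pyRange_one]
  simp only [Int.sub_zero]

theorem pvStep_comm (ws : List (List String)) : pvStepA (pvStepB ws) = pvStepB (pvStepA ws) := by
  unfold pvStepA pvStepB
  simp only [List.flatMap_assoc, List.map_flatMap, List.flatMap_map, List.map_map,
    Function.comp_def, List.append_assoc]

theorem pvStepA_build (k : Nat) : pvStepA (pvBuild (k + 1)) = pvBuild (k + 2) := by
  induction k with
  | zero => rfl
  | succ k ih =>
    show pvStepA (pvBuild (k + 2)) = pvBuild (k + 3)
    have h1 : pvBuild (k + 2) = pvStepB (pvBuild (k + 1)) := rfl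
    have h2 : pvBuild (k + 3) = pvStepB (pvBuild (k + 2)) := rfl
    rw [h1, pvStep_comm, ih, ← h2]

theorem pvStepA_iter (m : Nat) : pvStepA^[m] pvSyllables = pvBuild (m + 1) := by
  induction m with
  | zero => rfl
  | succ m ih =>
    rw [Function.iterate_succ_apply', ih]
    exact pvStepA_build m

theorem pvBuild_base (k : Nat) (h : k ≤ 1) : pvBuild k = pvSyllables := by
  interval_cases k <;> rfl

-- ===== VERDICT (by name: the statement is the Claim_ definition above) =====
theorem generateConlangIpaWords_spec : Claim_equal_generateConlangIpaWords := by
  intro n _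
  unfold Spec_generateConlangIpaWords generateConlangIpaWords_alt
  rw [pvA_eq, pvStepA_iter]
  by_cases h : 1 ≤ n
  · congr 1
    omega
  · rw [pvBuild_base ((n - 1).toNat + 1) (by omega), pvBuild_base n.toNat (by omega)]
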